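-- pv_equiv track=rewrite | github.com/aimin-tang/comp_programming | usaco/2018/so2_lemonade_line.py | solve
-- ===== SOURCE A (Python) =====
-- def solve(cows):
--     cows = reversed(sorted(cows))
--     waiting = []
--
--     for cow in cows:
--         if cow < len(waiting):
--             continue
--         else:
--             waiting.append(cow)
--
--     return len(waiting)
--
-- cows = [7, 1, 400, 2, 2]
-- ===== SOURCE B (Python) =====
-- def solve(cows):
--     s = sorted(cows, reverse=True)
--     lo, hi = 0, len(s)
--     while lo < hi:
--         mid = (lo + hi) // 2
--         if s[mid] >= mid:
--             lo = mid + 1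
--         else:
--             hi = mid
--     return lo
-- ===== Notes on version B (the rewrite author's own statement) =====
-- stated objective: alternative
-- what changed: B replaces A's linear scan that accumulates accepted cows into a Python list with a binary search on the descending-sorted array for the first index i with s[i] < i (both still sort first, so the sort dominates).
import Mathlib
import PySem

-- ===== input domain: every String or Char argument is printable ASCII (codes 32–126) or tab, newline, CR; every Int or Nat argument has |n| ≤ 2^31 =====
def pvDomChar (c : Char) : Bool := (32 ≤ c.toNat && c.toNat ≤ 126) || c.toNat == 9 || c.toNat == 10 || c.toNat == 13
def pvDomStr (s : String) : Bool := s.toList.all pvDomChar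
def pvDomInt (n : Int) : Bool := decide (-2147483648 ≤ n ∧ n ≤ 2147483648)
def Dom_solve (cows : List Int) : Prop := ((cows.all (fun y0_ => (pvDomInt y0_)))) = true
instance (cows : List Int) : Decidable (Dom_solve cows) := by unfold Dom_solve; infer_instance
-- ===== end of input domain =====

-- B replaces A's linear accumulate-into-a-list scan with a binary search on the
-- descending-sorted array for the first index i with s[i] < i (alternative decomposition).

-- ===== PORT A =====
def solve (cows : List Int) : Int :=
  let cowsR := (PySem.List.sorted cows (fun x => x) false).reverse
  let waiting := cowsR.foldl (fun w cow => if cow < (w.length : Int) then w else w ++ [cow]) ([] : List Int)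
  (waiting.length : Int)

-- ===== PORT B =====
-- the while-loop of Source B; indices stay in range (0 ≤ lo ≤ mid < hi ≤ len s), so pyGetD's default is never read
def pvBsearch (s : List Int) (lo hi : Int) : Int :=
  if h : lo < hi then
    let mid := PySem.Int.floordiv (lo + hi) 2
    if PySem.List.pyGetD s mid 0 ≥ mid then pvBsearch s (mid + 1) hi
    else pvBsearch s lo mid
  else lo
termination_by (hi - lo).toNat
decreasing_by
  · have h1 := PySem.Int.floordiv_two_mid_bounds (lo := lo) (hi := hi) (le_of_lt h)
    omega
  · have h2 : PySem.Int.floordiv (lo + hi) 2 < hi :=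
      (PySem.Int.floordiv_lt_iff_lt_mul (by norm_num)).mpr (by omega)
    omega

def solve_alt (cows : List Int) : Int :=
  let s := PySem.List.sorted cows (fun x => x) true
  pvBsearch s 0 (s.length : Int)

-- ===== PRECONDITION & SPEC =====
def Spec_solve (cows : List Int) (out : Int) : Prop := out = solve_alt cows
instance (cows : List Int) (out : Int) : Decidable (Spec_solve cows out) := by unfold Spec_solve; infer_instance

-- ===== CLAIM (what is proved, stated in full; the proofs are below) =====
def Claim_equal_solve : Prop := ∀ (cows : List Int), Dom_solve cows → Spec_solve cows (solve cows)

-- ===== LEMMAS AND PROOFS =====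

-- length evolution of A's waiting list
def lenFold : List Int → Nat → Nat
  | [], k => k
  | x :: t, k => if x < (k : Int) then lenFold t k else lenFold t (k + 1)

-- first crossover: the least i (counting from k) with s[i] < i, or k + length
def cross : List Int → Nat → Nat
  | [], k => k
  | x :: t, k => if x < (k : Int) then k else cross t (k + 1)

theorem foldl_len (xs : List Int) : ∀ w : List Int,
    (xs.foldl (fun w cow => if cow < (w.length : Int) then w else w ++ [cow]) w).length
      = lenFold xs w.length := by
  induction xs with
  | nil => intro w; simp [lenFold]
  | cons x t ih =>
    intro w
    by_cases hx : x < (w.length : Int) <;> simp [lenFold, hx, ih, List.length_append]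

theorem lenFold_const (xs : List Int) : ∀ k : Nat, (∀ x ∈ xs, x < (k : Int)) → lenFold xs k = k := by
  induction xs with
  | nil => intro k _; rfl
  | cons x t ih =>
    intro k h
    have hx : x < (k : Int) := h x (by simp)
    simp [lenFold, hx]
    exact ih k (fun y hy => h y (by simp [hy]))

theorem lenFold_eq_cross (xs : List Int) : ∀ k : Nat,
    xs.Pairwise (fun a b => b ≤ a) → lenFold xs k = cross xs k := by
  induction xs with
  | nil => intro k _; rfl
  | cons x t ih =>
    intro k hp
    rw [List.pairwise_cons] at hp
    by_cases hx : x < (k : Int)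
    · simp [lenFold, cross, hx]
      exact lenFold_const t k (fun y hy => lt_of_le_of_lt (hp.1 y hy) hx)
    · simp [lenFold, cross, hx, ih (k + 1) hp.2]

theorem cross_ge (xs : List Int) : ∀ k : Nat, k ≤ cross xs k := by
  induction xs with
  | nil => intro k; exact le_refl k
  | cons x t ih =>
    intro k
    by_cases hx : x < (k : Int) <;> simp [cross, hx]
    exact le_trans (Nat.le_succ k) (ih (k + 1))

theorem cross_le (xs : List Int) : ∀ k : Nat, cross xs k ≤ k + xs.length := by
  induction xs with
  | nil => intro k; simp [cross]
  | cons x t ih =>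
    intro k
    by_cases hx : x < (k : Int) <;> simp [cross, hx]
    have := ih (k + 1); omega

theorem cross_getD_ge (xs : List Int) : ∀ k i : Nat, k ≤ i → i < cross xs k →
    (i : Int) ≤ xs.getD (i - k) 0 := by
  induction xs with
  | nil => intro k i hk hi; simp [cross] at hi; omega
  | cons x t ih =>
    intro k i hk hi
    by_cases hx : x < (k : Int)
    · simp [cross, hx] at hi; omega
    · simp only [cross, if_neg hx] at hi
      rcases Nat.eq_or_lt_of_le hk with heq | hlt
      · subst heq; simpa using le_of_not_gt hx
      · have h1 : i - k = (i - (k + 1)) + 1 := by omega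
        rw [h1]
        simpa using ih (k + 1) i hlt hi

theorem cross_getD_lt (xs : List Int) : ∀ k : Nat, cross xs k < k + xs.length →
    xs.getD (cross xs k - k) 0 < (cross xs k : Int) := by
  induction xs with
  | nil => intro k h; simp [cross] at h
  | cons x t ih =>
    intro k h
    by_cases hx : x < (k : Int)
    · simp [cross, hx]
    · simp only [cross, if_neg hx] at h ⊢
      have hge := cross_ge t (k + 1)
      have h1 : cross t (k + 1) - k = (cross t (k + 1) - (k + 1)) + 1 := by omega
      rw [h1]
      simp only [List.getD_cons_succ]
      exact ih (k + 1) (by simp at h ⊢; omega)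

-- descending list: later entries are ≤ earlier ones
theorem desc_getD (s : List Int) (hs : s.Pairwise (fun a b => b ≤ a))
    {p q : Nat} (hpq : p ≤ q) (hq : q < s.length) : s.getD q 0 ≤ s.getD p 0 := by
  rcases Nat.eq_or_lt_of_le hpq with heq | hlt
  · subst heq; exact le_refl _
  · have hp : p < s.length := lt_trans hlt hq
    rw [List.getD_eq_getElem s 0 hq, List.getD_eq_getElem s 0 hp]
    exact (List.pairwise_iff_getElem.mp hs) p q hp hq hlt

theorem bsearch_eq (s : List Int) (hs : s.Pairwise (fun a b => b ≤ a)) :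
    ∀ fl : Nat, ∀ lo hi : Int, (hi - lo).toNat ≤ fl →
      0 ≤ lo → lo ≤ (cross s 0 : Int) → (cross s 0 : Int) ≤ hi → hi ≤ (s.length : Int) →
      pvBsearch s lo hi = (cross s 0 : Int) := by
  intro fl
  induction fl with
  | zero =>
    intro lo hi hfl h0 hlc hch hhn
    rw [pvBsearch]
    rw [dif_neg (by omega)]
    omega
  | succ n ih =>
    intro lo hi hfl h0 hlc hch hhn
    rw [pvBsearch]
    by_cases hlh : lo < hi
    · rw [dif_pos hlh]
      have hmid := PySem.Int.floordiv_two_mid_bounds (lo := lo) (hi := hi) (le_of_lt hlh)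
      have hmhi : PySem.Int.floordiv (lo + hi) 2 < hi :=
        (PySem.Int.floordiv_lt_iff_lt_mul (by norm_num)).mpr (by omega)
      set mid := PySem.Int.floordiv (lo + hi) 2 with hmiddef
      have h0m : 0 ≤ mid := by omega
      have hmn : mid < (s.length : Int) := by omega
      have hget : PySem.List.pyGetD s mid 0 = s.getD mid.toNat 0 := by
        rw [PySem.List.pyGetD_eq_getElem s 0 h0m (by simpa using hmn)]
        rw [List.getD_eq_getElem s 0 (by omega)]
      by_cases hc : PySem.List.pyGetD s mid 0 ≥ mid
      · rw [if_pos hc]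
        -- mid < cross: otherwise s[mid] ≤ s[cross] < cross ≤ mid
        have hmc : mid < (cross s 0 : Int) := by
          by_contra hcon
          have hcm : (cross s 0 : Int) ≤ mid := by omega
          have hclen : cross s 0 < s.length := by omega
          have h1 : s.getD (cross s 0) 0 < (cross s 0 : Int) := by
            simpa using cross_getD_lt s 0 (by simpa using hclen)
          have h2 : s.getD mid.toNat 0 ≤ s.getD (cross s 0) 0 :=
            desc_getD s hs (by omega) (by omega)
          rw [hget] at hc
          omega
        exact ih (mid + 1) hi (by omega) (by omega) (by omega) hch hhn
      · rw [if_neg hc]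
        -- cross ≤ mid: otherwise s[mid] ≥ mid
        have hcm : (cross s 0 : Int) ≤ mid := by
          by_contra hcon
          have h1 : (mid.toNat : Int) ≤ s.getD mid.toNat 0 :=
            cross_getD_ge s 0 mid.toNat (by omega) (by omega)
          rw [hget] at hc
          omega
        exact ih lo mid (by omega) h0 hlc hcm (by omega)
    · rw [dif_neg hlh]
      omega

-- reversing the ascending stable sort gives the descending stable sort (Int values, identity key)
theorem rev_sorted_eq (xs : List Int) :
    (PySem.List.sorted xs (fun x => x) false).reverse = PySem.List.sorted xs (fun x => x) true := by
  have hperm : (PySem.List.sorted xs (fun x => x) false).reverse.Perm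
      (PySem.List.sorted xs (fun x => x) true) :=
    ((List.reverse_perm _).trans (PySem.List.sorted_perm xs (fun x => x) false)).trans
      (PySem.List.sorted_perm xs (fun x => x) true).symm
  refine List.Perm.eq_of_pairwise (le := fun a b : Int => b ≤ a)
    (fun a b _ _ h1 h2 => le_antisymm h2 h1) ?_ ?_ hperm
  · rw [List.pairwise_reverse]
    exact PySem.List.sorted_pairwise xs (fun x => x)
  · exact PySem.List.sorted_pairwise_rev xs (fun x => x)

theorem solve_eq_alt (cows : List Int) : solve cows = solve_alt cows := by
  unfold solve solve_alt
  rw [rev_sorted_eq]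
  set s := PySem.List.sorted cows (fun x => x) true with hsdef
  have hs : s.Pairwise (fun a b => b ≤ a) := PySem.List.sorted_pairwise_rev cows (fun x => x)
  have hA : ((s.foldl (fun w cow => if cow < (w.length : Int) then w else w ++ [cow])
      ([] : List Int)).length : Int) = (cross s 0 : Int) := by
    have := foldl_len s []
    simp only [List.length_nil] at this
    rw [this, lenFold_eq_cross s 0 hs]
  have hB : pvBsearch s 0 (s.length : Int) = (cross s 0 : Int) := by
    exact bsearch_eq s hs (s.length) 0 (s.length) (by omega) (by omega)
      (by exact_mod_cast cross_ge s 0) (by have := cross_le s 0; omega) (by omega)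
  simp only [hA, hB]

-- ===== VERDICT (by name: the statement is the Claim_ definition above) =====
theorem solve_spec : Claim_equal_solve := by
  intro cows _
  unfold Spec_solve
  exact solve_eq_alt cows
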